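-- pv_equiv track=rewrite | github.com/chomu97/algorithm | queue,stack/baekjoon7490.py | is_zero2
-- ===== SOURCE A (Python) =====
-- from collections import deque
--
-- def is_zero2(nums: str, n: int):
--     numbers = list(range(1,n+1))
--     queue = deque()
--     answer = 0
--     for idx, num in enumerate(nums):
--         if num == '0':
--             queue.append(queue.pop()*10 + numbers[idx])
--         else:
--             queue.append(numbers[idx])
--     for idx, num in enumerate(nums):
--         if num == '0':
--             continue
--         elif num == '1':
--             answer += queue.popleft()
--         else:
--             answer -= queue.popleft()
--     return answer == 0
-- ===== SOURCE B (Python) =====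
-- def is_zero2(nums: str, n: int):
--     # single pass: maintain flushed sum, current sign and current merged number
--     answer = 0
--     sign = 0
--     current = 0
--     for idx, ch in enumerate(nums):
--         if ch == '0':
--             current = current * 10 + (idx + 1)
--         else:
--             answer += sign * current
--             sign = 1 if ch == '1' else -1
--             current = idx + 1
--     answer += sign * current
--     return answer == 0
-- ===== Notes on version B (the rewrite author's own statement) =====
-- stated objective: simpler
-- what changed: Replaces A's two-pass deque algorithm (first pass merges digit-runs into numbers via an indexed range list and a deque, second pass re-scans the string consuming the deque with signs) by a single pass that keeps a running answer, the current sign and the current merged number, with one flush at the end; no range list and no deque are built.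
import Mathlib
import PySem

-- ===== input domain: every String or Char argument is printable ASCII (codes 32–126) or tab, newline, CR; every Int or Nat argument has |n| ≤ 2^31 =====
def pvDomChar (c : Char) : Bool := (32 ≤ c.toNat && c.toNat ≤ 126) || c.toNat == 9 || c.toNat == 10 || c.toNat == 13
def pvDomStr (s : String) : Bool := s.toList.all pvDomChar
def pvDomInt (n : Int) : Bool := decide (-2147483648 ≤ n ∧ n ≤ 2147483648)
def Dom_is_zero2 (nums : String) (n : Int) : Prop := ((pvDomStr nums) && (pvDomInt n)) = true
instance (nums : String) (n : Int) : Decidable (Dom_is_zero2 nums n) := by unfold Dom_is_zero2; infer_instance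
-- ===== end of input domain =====

-- B replaces A's two-pass deque algorithm (build merged numbers, then re-scan consuming them)
-- with one pass that keeps a running answer, the current sign and the current merged number
-- (objective: simpler). Pre_ excludes exactly the inputs where A raises IndexError.


-- ===== PORT A =====
-- first loop: `for idx, num in enumerate(nums): if num == '0': queue.append(queue.pop()*10+numbers[idx]) else: queue.append(numbers[idx])`
-- none = IndexError (deque.pop on empty, or numbers[idx] out of range)
def is_zero2_loop1 (numbers : List Int) : List Char → Nat → List Int → Option (List Int)
  | [], _, queue => some queue
  | c :: rest, idx, queue =>
    if c == '0' then
      match queue.getLast?, PySem.List.pyGet? numbers (idx : Int) with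
      | some last, some v => is_zero2_loop1 numbers rest (idx + 1) (queue.dropLast ++ [last * 10 + v])
      | _, _ => none
    else
      match PySem.List.pyGet? numbers (idx : Int) with
      | some v => is_zero2_loop1 numbers rest (idx + 1) (queue ++ [v])
      | none => none

-- second loop: skip '0'; '1' adds queue.popleft(), otherwise subtract it; none = IndexError
def is_zero2_loop2 : List Char → List Int → Int → Option Int
  | [], _, answer => some answer
  | c :: rest, queue, answer =>
    if c == '0' then is_zero2_loop2 rest queue answer
    else
      match queue with
      | x :: queue' => is_zero2_loop2 rest queue' (if c == '1' then answer + x else answer - x)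
      | [] => none

def is_zero2 (nums : String) (n : Int) : Bool :=
  let numbers := PySem.List.pyRange 1 (n + 1) 1
  match is_zero2_loop1 numbers nums.toList 0 [] with
  | none => false   -- Python raises here (outside Pre_)
  | some queue =>
    match is_zero2_loop2 nums.toList queue 0 with
    | none => false -- Python raises here (outside Pre_)
    | some answer => answer == 0

-- ===== PORT B =====
-- one pass over enumerate(nums) with (answer, sign, current); final flush at the end
def is_zero2_alt_loop : List Char → Nat → Int → Int → Int → Int
  | [], _, answer, sign, current => answer + sign * current
  | c :: rest, idx, answer, sign, current =>
    if c == '0' then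
      is_zero2_alt_loop rest (idx + 1) answer sign (current * 10 + ((idx : Int) + 1))
    else
      is_zero2_alt_loop rest (idx + 1) (answer + sign * current)
        (if c == '1' then 1 else -1) ((idx : Int) + 1)

def is_zero2_alt (nums : String) (n : Int) : Bool :=
  is_zero2_alt_loop nums.toList 0 0 0 0 == 0

-- ===== PRECONDITION & SPEC =====
-- Pre_ excludes exactly the inputs on which A raises IndexError: a nonempty string whose
-- first character is '0' (deque.pop on an empty deque) or whose length exceeds n (numbers[idx]).
def Pre_is_zero2 (nums : String) (n : Int) : Prop :=
  nums.toList = [] ∨ ((nums.toList.length : Int) ≤ n ∧ nums.toList.head? ≠ some '0')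
instance (nums : String) (n : Int) : Decidable (Pre_is_zero2 nums n) := by
  unfold Pre_is_zero2; infer_instance

def pvWitness_is_zero2 : String × Int := ("1020", 4)

def Spec_is_zero2 (nums : String) (n : Int) (out : Bool) : Prop := out = is_zero2_alt nums n
instance (nums : String) (n : Int) (out : Bool) : Decidable (Spec_is_zero2 nums n out) := by
  unfold Spec_is_zero2; infer_instance

-- ===== CLAIM (what is proved, stated in full; the proofs are below) =====
def Claim_equal_is_zero2 : Prop := ∀ (nums : String) (n : Int), Dom_is_zero2 nums n → Pre_is_zero2 nums n → Spec_is_zero2 nums n (is_zero2 nums n)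

-- ===== LEMMAS AND PROOFS =====

-- the value numbers[idx] is idx+1, the sign of a non-'0' char, pairs of (value, char)
def pvSgn (c : Char) : Int := if c == '1' then 1 else -1

def pvPairs : Nat → List Char → List (Int × Char)
  | _, [] => []
  | k, c :: cs => ((k : Int) + 1, c) :: pvPairs (k + 1) cs

-- pure version of A's first loop: merged segment numbers
def pvSegs : List (Int × Char) → List Int → List Int
  | [], q => q
  | (v, c) :: rest, q =>
    if c == '0' then pvSegs rest (q.dropLast ++ [q.getLastD 0 * 10 + v])
    else pvSegs rest (q ++ [v])

def pvSigns (pairs : List (Int × Char)) : List Int :=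
  (pairs.filter (fun p => p.2 != '0')).map (fun p => pvSgn p.2)

def pvDot (ss q : List Int) : Int := (List.zipWith (· * ·) ss q).sum

-- pure one-pass evaluation (B's recursion on (value, char) pairs)
def pvEval : List (Int × Char) → Int → Int → Int
  | [], s, c => s * c
  | (v, ch) :: rest, s, c =>
    if ch == '0' then pvEval rest s (c * 10 + v)
    else s * c + pvEval rest (pvSgn ch) v

theorem pvEval_alt_loop (cs : List Char) : ∀ (k : Nat) (a s c : Int),
    is_zero2_alt_loop cs k a s c = a + pvEval (pvPairs k cs) s c := by
  induction cs with
  | nil => intro k a s c; simp [is_zero2_alt_loop, pvPairs, pvEval]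
  | cons ch rest ih =>
    intro k a s c
    simp only [is_zero2_alt_loop, pvPairs, pvEval]
    by_cases h : ch == '0'
    · simp [h, ih]
    · simp [h, ih, pvSgn]; ring

theorem pvRange_get (n : Int) (k : Nat) (hk : (k : Int) < n) :
    PySem.List.pyGet? (PySem.List.pyRange 1 (n + 1) 1) (k : Int) = some ((k : Int) + 1) := by
  rw [PySem.List.pyGet?_natCast, PySem.List.pyRange_one]
  have hlen : k < ((n + 1 - 1).toNat) := by omega
  rw [List.getElem?_map, List.getElem?_range hlen]
  simp [add_comm]

theorem pvLoop1_eq (n : Int) (cs : List Char) : ∀ (k : Nat) (q : List Int),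
    (k : Int) + cs.length ≤ n →
    (q = [] → cs = [] ∨ cs.head? ≠ some '0') →
    is_zero2_loop1 (PySem.List.pyRange 1 (n + 1) 1) cs k q = some (pvSegs (pvPairs k cs) q) := by
  induction cs with
  | nil => intro k q _ _; simp [is_zero2_loop1, pvPairs, pvSegs]
  | cons c rest ih =>
    intro k q hlen hq
    simp only [List.length_cons] at hlen
    push_cast at hlen
    have hget := pvRange_get n k (by omega)
    by_cases h : c == '0'
    · have hqne : q ≠ [] := by
        intro he
        rcases hq he with h1 | h1
        · exact (List.cons_ne_nil _ _) h1
        · exact h1 (by rw [beq_iff_eq.mp h]; rfl)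
      have hlast : q.getLast? = some (q.getLastD 0) := by
        cases q with
        | nil => exact absurd rfl hqne
        | cons x xs => simp [List.getLastD_eq_getLast?, List.getLast?_cons]
      simp only [is_zero2_loop1, h, if_true, hlast, hget, pvPairs, pvSegs]
      rw [ih (k + 1) _ (by push_cast; omega)
        (by intro he; exact absurd he (by simp))]
    · simp only [is_zero2_loop1, h, Bool.false_eq_true, if_false, hget, pvPairs, pvSegs]
      rw [ih (k + 1) _ (by push_cast; omega)
        (by intro he; exact absurd he (by simp))]

theorem pvLoop2_eq (cs : List Char) : ∀ (q : List Int) (a : Int),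
    q.length = (cs.filter (fun c => c != '0')).length →
    is_zero2_loop2 cs q a = some (a + pvDot ((cs.filter (fun c => c != '0')).map pvSgn) q) := by
  induction cs with
  | nil =>
    intro q a h
    simp [is_zero2_loop2, pvDot]
  | cons c rest ih =>
    intro q a h
    by_cases hc : c == '0'
    · have : (c != '0') = false := by simp_all
      simp only [is_zero2_loop2, hc, if_true]
      rw [ih q a (by simpa [List.filter, this] using h)]
      simp [List.filter, this]
    · have hcf : (c != '0') = true := by simp_all
      cases q with
      | nil => simp [List.filter, hcf] at h
      | cons x q' =>
        simp only [is_zero2_loop2, hc, Bool.false_eq_true, if_false]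
        rw [ih q' _ (by simpa [List.filter, hcf] using h)]
        simp only [List.filter, hcf, List.map, pvDot, List.zipWith, List.sum_cons]
        by_cases h1 : c == '1' <;> simp [h1, pvSgn] <;> ring_nf

-- pvSigns over pvPairs is the map of signs over the filtered chars
theorem pvSigns_pairs (cs : List Char) : ∀ (k : Nat),
    pvSigns (pvPairs k cs) = (cs.filter (fun c => c != '0')).map pvSgn := by
  induction cs with
  | nil => intro k; simp [pvPairs, pvSigns]
  | cons c rest ih =>
    intro k
    by_cases h : c != '0' <;>
      simp [pvPairs, pvSigns, List.filter, h] <;>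
      simpa [pvSigns] using ih (k + 1)

-- length of the merged-segment list, under the leading-non-'0' invariant
theorem pvSegs_length (pairs : List (Int × Char)) : ∀ (q : List Int),
    (q = [] → pairs = [] ∨ (∀ v, pairs.head? ≠ some (v, '0'))) →
    (pvSegs pairs q).length = q.length + (pairs.filter (fun p => p.2 != '0')).length := by
  induction pairs with
  | nil => intro q _; simp [pvSegs]
  | cons p rest ih =>
    intro q hq
    obtain ⟨v, c⟩ := p
    by_cases h : c == '0'
    · have hqne : q ≠ [] := by
        intro he
        rcases hq he with h1 | h1
        · exact (List.cons_ne_nil _ _) h1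
        · exact h1 v (by rw [beq_iff_eq.mp h]; rfl)
      have hc : c = '0' := beq_iff_eq.mp h
      simp only [pvSegs, h, if_true]
      rw [ih _ (by intro he; exact absurd he (by simp))]
      have : (q.dropLast ++ [q.getLastD 0 * 10 + v]).length = q.length := by
        cases q with
        | nil => exact absurd rfl hqne
        | cons x xs => simp [List.length_dropLast]
      rw [this]
      simp [List.filter, hc]
    · have hcf : (c != '0') = true := by simp_all
      simp only [pvSegs, h, Bool.false_eq_true, if_false]
      rw [ih _ (by intro he; exact absurd he (by simp))]
      simp [List.filter, hcf]
      omega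

-- the central lemma: dot product of signs with merged segments = one-pass evaluation
theorem pvKey (pairs : List (Int × Char)) : ∀ (ss q : List Int) (s c : Int),
    ss.length = q.length →
    pvDot (ss ++ s :: pvSigns pairs) (pvSegs pairs (q ++ [c])) = pvDot ss q + pvEval pairs s c := by
  induction pairs with
  | nil =>
    intro ss q s c hl
    simp [pvSegs, pvSigns, pvEval, pvDot, List.zipWith_append hl]
  | cons p rest ih =>
    intro ss q s c hl
    obtain ⟨v, ch⟩ := p
    by_cases h : ch == '0'
    · have hc : ch = '0' := beq_iff_eq.mp h
      simp only [pvSegs, pvSigns, pvEval, hc, if_true]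
      have hd : (q ++ [c]).dropLast ++ [(q ++ [c]).getLastD 0 * 10 + v] = q ++ [c * 10 + v] := by
        simp
      rw [hd]
      have := ih ss q s (c * 10 + v) hl
      simpa [pvSigns, List.filter, hc] using this
    · have hne : ch ≠ '0' := by simpa using h
      have hf : pvSigns ((v, ch) :: rest) = pvSgn ch :: pvSigns rest := by
        simp [pvSigns, hne]
      have hss : ss ++ s :: pvSgn ch :: pvSigns rest = (ss ++ [s]) ++ pvSgn ch :: pvSigns rest := by
        simp
      have hdot : pvDot (ss ++ [s]) (q ++ [c]) = pvDot ss q + s * c := by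
        simp [pvDot, List.zipWith_append hl]
      simp only [pvSegs, pvEval, h, Bool.false_eq_true, if_false, hf]
      rw [hss, ih (ss ++ [s]) (q ++ [c]) (pvSgn ch) v (by simp [hl]), hdot]
      ring

-- ===== VERDICT (by name: the statement is the Claim_ definition above) =====
theorem is_zero2_spec : Claim_equal_is_zero2 := by
  intro nums n _ hpre
  unfold Spec_is_zero2
  simp only [is_zero2, is_zero2_alt]
  rcases hpre with he | ⟨hlen, hhd⟩
  · rw [he]; simp [is_zero2_loop1, is_zero2_loop2, is_zero2_alt_loop]
  · cases hcs : nums.toList with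
    | nil => simp [is_zero2_loop1, is_zero2_loop2, is_zero2_alt_loop]
    | cons c rest =>
      rw [hcs] at hlen hhd
      have hc0 : ¬ (c == '0') := by
        intro h; exact hhd (by simp [List.head?, beq_iff_eq.mp h])
      -- evaluate A's first loop
      simp only [List.length_cons] at hlen
      push_cast at hlen
      have hget := pvRange_get n 0 (by omega)
      have h1 : is_zero2_loop1 (PySem.List.pyRange 1 (n + 1) 1) (c :: rest) 0 [] =
          some (pvSegs (pvPairs 1 rest) [(0 : Int) + 1]) := by
        simp only [is_zero2_loop1, hc0, Bool.false_eq_true, if_false]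
        rw [hget]
        exact pvLoop1_eq n rest 1 [(0 : Int) + 1] (by push_cast; omega)
          (by intro he; exact absurd he (by simp))
      rw [h1]
      -- evaluate A's second loop via the dot product
      have hseglen : (pvSegs (pvPairs 1 rest) [(0 : Int) + 1]).length =
          1 + ((pvPairs 1 rest).filter (fun p => p.2 != '0')).length := by
        exact pvSegs_length (pvPairs 1 rest) [(0 : Int) + 1] (by intro he; exact absurd he (by simp))
      have hfl : ∀ (k : Nat) (cs : List Char),
          ((pvPairs k cs).filter (fun p => p.2 != '0')).length = (cs.filter (fun c => c != '0')).length := by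
        intro k cs
        induction cs generalizing k with
        | nil => simp [pvPairs]
        | cons x xs ihx =>
          by_cases hx : x != '0' <;> simp [pvPairs, List.filter, hx, ihx]
      have h2 := pvLoop2_eq (c :: rest) (pvSegs (pvPairs 1 rest) [(0 : Int) + 1]) 0
        (by rw [hseglen, hfl]; simp [List.filter_cons, (show ¬ c = '0' by simpa using hc0)]; omega)
      simp only [h2]
      -- both sides as pvEval
      have hsigns : ((c :: rest).filter (fun c => c != '0')).map pvSgn =
          pvSgn c :: pvSigns (pvPairs 1 rest) := by
        simp [List.filter, (show (c != '0') = true by simp_all), pvSigns_pairs]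
      have hkey := pvKey (pvPairs 1 rest) [] [] (pvSgn c) ((0 : Int) + 1) rfl
      simp only [List.nil_append] at hkey
      have hB := pvEval_alt_loop (c :: rest) 0 0 0 0
      simp only [pvEval, pvPairs, hc0, Bool.false_eq_true, if_false] at hB
      rw [hsigns, hkey]
      rw [hB]
      norm_num [pvDot]
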